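-- pv_equiv track=rewrite | github.com/ivangq24/konecto-agent | backend/evaluation/validators.py | check_clarification
-- ===== SOURCE A (Python) =====
-- from typing import Dict, Any, Optional
--
-- def check_clarification(response: str, test_case: Dict) -> bool:
--     """
--     Verify that clarification is requested when required.
--
--     Args:
--         response: Agent's response text
--         test_case: Test case dictionary with should_ask_clarification field
--
--     Returns:
--         True if clarification is asked (when required) or not required, False otherwise
--     """
--     should_ask = test_case.get("should_ask_clarification", False)
--     if not should_ask:
--         return True
--
--     clarification_phrases = [
--         "what voltage",
--         "which voltage",
--         "what phase",
--         "which phase",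
--         "need more",
--         "please specify",
--         "could you please",
--         "please confirm",
--     ]
--
--     response_lower = response.lower()
--     return any(phrase in response_lower for phrase in clarification_phrases)
-- ===== SOURCE B (Python) =====
-- def check_clarification(response: str, test_case: dict) -> bool:
--     """Single left-to-right pass over the text: at each position, test whether
--     any clarification phrase starts there (instead of eight separate substring scans)."""
--     if not test_case.get("should_ask_clarification", False):
--         return True
--
--     clarification_phrases = (
--         "what voltage",
--         "which voltage",
--         "what phase",
--         "which phase",
--         "need more",
--         "please specify",
--         "could you please",
--         "please confirm",
--     )
--
--     t = response.lower()
--     return any(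
--         any(t.startswith(p, i) for p in clarification_phrases)
--         for i in range(len(t))
--     )
-- ===== Notes on version B (the rewrite author's own statement) =====
-- stated objective: alternative
-- what changed: Replaces the eight phrase-major 'phrase in response_lower' substring scans with a single text-major pass that, at each position of the lowered response, tests whether any phrase starts there via startswith(p, i).
import Mathlib
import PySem

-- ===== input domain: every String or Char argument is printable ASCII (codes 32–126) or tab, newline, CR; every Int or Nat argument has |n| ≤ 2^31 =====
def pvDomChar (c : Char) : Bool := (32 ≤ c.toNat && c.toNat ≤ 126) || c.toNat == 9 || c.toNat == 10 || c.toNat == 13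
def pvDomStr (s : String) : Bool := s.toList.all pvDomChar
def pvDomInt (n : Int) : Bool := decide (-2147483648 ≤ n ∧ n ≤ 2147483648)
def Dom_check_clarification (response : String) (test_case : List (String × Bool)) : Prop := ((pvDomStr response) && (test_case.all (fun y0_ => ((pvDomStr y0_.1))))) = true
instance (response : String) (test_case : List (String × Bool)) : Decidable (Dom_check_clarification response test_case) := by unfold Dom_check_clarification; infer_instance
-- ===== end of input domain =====

-- B does one left-to-right pass over the lowered text, testing at each position whether
-- some phrase starts there, instead of A's eight separate substring-containment scans.

-- ===== PORT A =====
def clarificationPhrasesA : List String :=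
  ["what voltage", "which voltage", "what phase", "which phase",
   "need more", "please specify", "could you please", "please confirm"]

def check_clarification (response : String) (test_case : List (String × Bool)) : Bool :=
  let should_ask := PySem.Dict.getD (PySem.Dict.mk test_case) "should_ask_clarification" false
  if !should_ask then true
  else
    let response_lower := PySem.Str.lower response
    clarificationPhrasesA.any (fun phrase => PySem.Str.isIn phrase response_lower)

-- ===== PORT B =====
def clarificationPhrasesB : List String :=
  ["what voltage", "which voltage", "what phase", "which phase",
   "need more", "please specify", "could you please", "please confirm"]

-- one pass over the text: at each position (= each nonempty suffix) test the phrases as prefixes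
def scanB : List Char → Bool
  | [] => false
  | c :: rest =>
      (clarificationPhrasesB.any fun p => List.isPrefixOf p.toList (c :: rest)) || scanB rest

def check_clarification_alt (response : String) (test_case : List (String × Bool)) : Bool :=
  if !(PySem.Dict.getD (PySem.Dict.mk test_case) "should_ask_clarification" false) then true
  else scanB (PySem.Str.lower response).toList

-- ===== PRECONDITION & SPEC =====
def Spec_check_clarification (response : String) (test_case : List (String × Bool)) (out : Bool) : Prop := out = check_clarification_alt response test_case
instance (response : String) (test_case : List (String × Bool)) (out : Bool) : Decidable (Spec_check_clarification response test_case out) := by unfold Spec_check_clarification; infer_instance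

-- ===== CLAIM (what is proved, stated in full; the proofs are below) =====
def Claim_equal_check_clarification : Prop := ∀ (response : String) (test_case : List (String × Bool)), Dom_check_clarification response test_case → Spec_check_clarification response test_case (check_clarification response test_case)

-- ===== LEMMAS AND PROOFS =====

lemma scanB_iff (t : List Char) :
    scanB t = true ↔ ∃ p ∈ clarificationPhrasesB, p.toList <:+: t := by
  induction t with
  | nil => decide
  | cons c rest ih =>
      simp only [scanB, Bool.or_eq_true, List.any_eq_true, ih]
      constructor
      · rintro (⟨p, hp, hpre⟩ | ⟨p, hp, hinf⟩)
        · exact ⟨p, hp, ((List.isPrefixOf_iff_prefix).mp hpre).isInfix⟩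
        · exact ⟨p, hp, hinf.trans (List.suffix_cons c rest).isInfix⟩
      · rintro ⟨p, hp, hinf⟩
        rcases (List.infix_cons_iff).mp hinf with hpre | hinf'
        · exact Or.inl ⟨p, hp, (List.isPrefixOf_iff_prefix).mpr hpre⟩
        · exact Or.inr ⟨p, hp, hinf'⟩

lemma anyA_eq_scanB (t : List Char) :
    (clarificationPhrasesA.any fun phrase => PySem.Chars.isIn phrase.toList t) = scanB t := by
  rcases h : scanB t with _ | _
  · rw [Bool.eq_false_iff] at h ⊢
    intro hc
    apply h
    rw [scanB_iff]
    simp only [List.any_eq_true] at hc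
    obtain ⟨p, hp, hin⟩ := hc
    exact ⟨p, hp, (PySem.Chars.isIn_iff_infix _ _).mp hin⟩
  · obtain ⟨p, hp, hinf⟩ := (scanB_iff t).mp h
    simp only [List.any_eq_true]
    exact ⟨p, hp, (PySem.Chars.isIn_iff_infix _ _).mpr hinf⟩

-- ===== VERDICT (by name: the statement is the Claim_ definition above) =====
theorem check_clarification_spec : Claim_equal_check_clarification := by
  intro response test_case _
  unfold Spec_check_clarification check_clarification check_clarification_alt
  by_cases h : (PySem.Dict.getD (PySem.Dict.mk test_case) "should_ask_clarification" false) = false <;>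
    simp_all [anyA_eq_scanB]
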